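-- pv_equiv track=rewrite | github.com/tashakim/puzzles_python | checkSumOrd.py | checkPossibility
-- ===== SOURCE A (Python) =====
-- from typing import List
--
-- def checkPossibility(nums: List[int]) -> bool:
--     # Purpose: Checks if at most one edit can make a non-decreasing array.
--     bool = False
--     def check(arr, bool):
--         i = 0
--         while i < len(arr)-1:
--             if arr[i+1] < arr[i]:
--                 if bool == False:
--                     bool = True
--                     temp = arr.copy()
--                     temp.pop(i)
--                     arr.pop(i+1)
--                     return check(temp, bool) or check(arr, bool)
--                 else:
--                     return False
--             i += 1
--         return True
--     return check(nums, bool)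
-- ===== SOURCE B (Python) =====
-- from typing import List
--
-- def checkPossibility(nums: List[int]) -> bool:
--     # Single-pass greedy: track previous two (virtually fixed) values and an
--     # "edit used" flag; at a violation either lower the previous value or
--     # raise the current one.  Does not mutate nums.
--     used = False
--     p2 = None  # value two positions back (after virtual fixes)
--     p1 = None  # previous value (after virtual fixes)
--     for x in nums:
--         if p1 is not None and x < p1:
--             if used:
--                 return False
--             used = True
--             if p2 is None or p2 <= x:
--                 p2, p1 = p1, x        # lower previous down to x
--             else:
--                 p2, p1 = p1, p1       # raise x up to previous
--         else:
--             p2, p1 = p1, x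
--     return True
-- ===== Notes on version B (the rewrite author's own statement) =====
-- stated objective: faster
-- what changed: Replaced A's recursive delete-and-rescan (copying the list and re-checking both one-element deletions from scratch) by the classic single-pass greedy with an edit flag and the previous two virtual values; B also does not mutate nums, while A pops an element from the caller's list when a violation exists.
import Mathlib
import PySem

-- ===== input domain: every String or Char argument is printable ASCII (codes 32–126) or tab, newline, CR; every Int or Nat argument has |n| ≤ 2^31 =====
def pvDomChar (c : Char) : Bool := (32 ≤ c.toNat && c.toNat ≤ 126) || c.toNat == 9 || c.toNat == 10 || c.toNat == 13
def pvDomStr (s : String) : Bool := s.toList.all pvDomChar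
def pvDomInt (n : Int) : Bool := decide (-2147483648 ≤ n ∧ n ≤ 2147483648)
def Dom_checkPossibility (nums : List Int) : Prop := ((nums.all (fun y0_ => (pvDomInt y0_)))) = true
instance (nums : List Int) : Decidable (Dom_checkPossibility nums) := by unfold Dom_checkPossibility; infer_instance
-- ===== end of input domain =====

-- B replaces A's recursive delete-and-rescan by a single-pass greedy (simpler, no copies);
-- return-value equivalence only: A pops an element from the caller's list, B does not mutate.

-- ===== PORT A =====
-- A's inner `check`: while-loop over index i, on first violation recurse on the two
-- one-element deletions with the flag set (then any further violation returns False).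
-- `fuel` is only a structural-termination guard: 2*len+2 steps always suffice (proved below),
-- so the fuel-exhausted branch is never reached on the stated call.
def checkA (fuel : Nat) (arr : List Int) (b : Bool) (i : Nat) : Bool :=
  match fuel with
  | 0 => true
  | fuel + 1 =>
    if h : i + 1 < arr.length then
      if arr[i+1] < arr[i]'(by omega) then
        if b = false then
          checkA fuel (arr.eraseIdx i) true 0 || checkA fuel (arr.eraseIdx (i+1)) true 0
        else false
      else checkA fuel arr b (i+1)
    else true

def checkPossibility (nums : List Int) : Bool := checkA (2 * nums.length + 2) nums false 0

-- ===== PORT B =====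
-- B's loop state: p2, p1 = previous two (virtually fixed) values, used = edit flag.
def goB (xs : List Int) (p2 p1 : Option Int) (used : Bool) : Bool :=
  match xs with
  | [] => true
  | x :: rest =>
    match p1 with
    | some p =>
      if x < p then
        if used then false
        else
          match p2 with
          | none => goB rest p1 (some x) true
          | some q => if q ≤ x then goB rest p1 (some x) true else goB rest p1 (some p) true
      else goB rest p1 (some x) used
    | none => goB rest p1 (some x) used

def checkPossibility_alt (nums : List Int) : Bool := goB nums none none false

-- ===== PRECONDITION & SPEC =====
def Spec_checkPossibility (nums : List Int) (out : Bool) : Prop := out = checkPossibility_alt nums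
instance (nums : List Int) (out : Bool) : Decidable (Spec_checkPossibility nums out) := by unfold Spec_checkPossibility; infer_instance

-- ===== CLAIM (what is proved, stated in full; the proofs are below) =====
def Claim_equal_checkPossibility : Prop := ∀ (nums : List Int), Dom_checkPossibility nums → Spec_checkPossibility nums (checkPossibility nums)

-- ===== LEMMAS AND PROOFS =====

-- boolean "non-decreasing" check
def chainB : List Int → Bool
  | [] => true
  | [_] => true
  | x :: y :: t => decide (x ≤ y) && chainB (y :: t)

def lastLe (pre : List Int) (x : Int) : Bool :=
  match pre.getLast? with
  | none => true
  | some l => decide (l ≤ x)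

theorem chainB_append (pre : List Int) (x : Int) (s : List Int) :
    chainB (pre ++ x :: s) = (chainB pre && lastLe pre x && chainB (x :: s)) := by
  induction pre with
  | nil => simp [chainB, lastLe]
  | cons p t ih =>
    cases t with
    | nil => simp [chainB, lastLe]
    | cons q u =>
      show (decide (p ≤ q) && chainB ((q :: u) ++ x :: s)) = _
      rw [ih]
      show _ = ((decide (p ≤ q) && chainB (q :: u)) && lastLe (p :: q :: u) x && chainB (x :: s))
      have hl : lastLe (p :: q :: u) x = lastLe (q :: u) x := by
        simp [lastLe, List.getLast?_cons_cons]
      rw [hl, Bool.and_assoc, Bool.and_assoc, Bool.and_assoc]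

theorem chainB_absorb (b a : Int) (s : List Int) (hba : b ≤ a) :
    (chainB (b :: s) || chainB (a :: s)) = chainB (b :: s) := by
  cases s with
  | nil => simp [chainB]
  | cons y t =>
    simp only [chainB]
    by_cases h : chainB (y :: t) = true <;> by_cases h2 : a ≤ y <;>
      simp_all; omega

theorem goB_true (xs : List Int) (p2 : Option Int) (p : Int) :
    goB xs p2 (some p) true = chainB (p :: xs) := by
  induction xs generalizing p2 p with
  | nil => simp [goB, chainB]
  | cons x rest ih =>
    simp only [goB]
    by_cases h : x < p
    · have : ¬ (p ≤ x) := by omega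
      simp [h, chainB, this]
    · have : p ≤ x := by omega
      simp [h, chainB, this, ih]

theorem checkA_true (fuel : Nat) (arr : List Int) (i : Nat) (hf : arr.length - i < fuel) :
    checkA fuel arr true i = chainB (arr.drop i) := by
  match fuel with
  | 0 => omega
  | f + 1 =>
  by_cases h : i + 1 < arr.length
  · have hi : i < arr.length := by omega
    rw [checkA]
    have hd : arr.drop i = arr[i] :: arr.drop (i+1) := List.drop_eq_getElem_cons hi
    have hd2 : arr.drop (i+1) = arr[i+1] :: arr.drop (i+2) := List.drop_eq_getElem_cons h
    rw [hd, hd2]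
    simp only [h, dite_true, chainB]
    by_cases hv : arr[i+1] < arr[i]
    · have : ¬ (arr[i] ≤ arr[i+1]) := by omega
      simp [hv, this]
    · have : arr[i] ≤ arr[i+1] := by omega
      simp only [hv, if_false, this, decide_true, Bool.true_and]
      rw [checkA_true f arr (i+1) (by omega), hd2]
  · rw [checkA]; simp only [h, dite_false]
    cases e : arr.drop i with
    | nil => rfl
    | cons x t =>
      cases t with
      | nil => rfl
      | cons y u =>
        have : (arr.drop i).length ≤ 1 := by simp; omega
        rw [e] at this; simp at this

-- facts about chainB of a take-prefix
theorem getLast?_take (arr : List Int) (i : Nat) (hi : i < arr.length) (h1 : 1 ≤ i) :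
    (arr.take i).getLast? = some (arr[i-1]'(by omega)) := by
  rw [List.getLast?_eq_getElem?]
  have hlen : (arr.take i).length = i := by simp; omega
  rw [hlen, List.getElem?_take, if_pos (by omega)]
  exact List.getElem?_eq_getElem (by omega)

theorem take_succ_concat (arr : List Int) (i : Nat) (hi : i < arr.length) :
    arr.take (i+1) = arr.take i ++ [arr[i]] := by
  rw [List.take_add_one, List.getElem?_eq_getElem hi]; rfl

-- Main bridge: checkA with the flag down equals the greedy loop, aligned so that the
-- greedy is about to consume arr[i+1] with p1 = arr[i], p2 = arr[i-1] (none at i = 0),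
-- under the invariant that the scanned prefix is already non-decreasing.
theorem mainM (fuel : Nat) (arr : List Int) (i : Nat)
    (hf : arr.length - i + arr.length + 1 ≤ fuel)
    (hch : chainB (arr.take (i+1)) = true) :
    checkA fuel arr false i
      = goB (arr.drop (i+1)) (if i = 0 then none else arr[i-1]?) arr[i]? false := by
  match fuel with
  | 0 => omega
  | f + 1 =>
  by_cases h : i + 1 < arr.length
  · have hi : i < arr.length := by omega
    rw [checkA]
    have hd : arr.drop (i+1) = arr[i+1] :: arr.drop (i+2) := List.drop_eq_getElem_cons h
    rw [hd]
    simp only [h, dite_true, List.getElem?_eq_getElem hi, goB]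
    -- prefix facts from hch
    have hsplit : chainB (arr.take i) = true ∧ lastLe (arr.take i) arr[i] = true := by
      have := chainB_append (arr.take i) arr[i] []
      rw [← take_succ_concat arr i hi] at this
      rw [this] at hch
      simp only [Bool.and_eq_true] at hch
      exact ⟨hch.1.1, hch.1.2⟩
    by_cases hv : arr[i+1] < arr[i]
    · -- violation: A tries both deletions, B consults p2
      simp only [hv, if_true]
      have hel1 : (arr.eraseIdx i).length - 0 < f := by
        simp only [List.length_eraseIdx]; split <;> omega
      have hel2 : (arr.eraseIdx (i+1)).length - 0 < f := by
        simp only [List.length_eraseIdx]; split <;> omega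
      rw [checkA_true f _ 0 hel1, checkA_true f _ 0 hel2]
      have he1 : (arr.eraseIdx i).drop 0 = arr.take i ++ (arr[i+1] :: arr.drop (i+2)) := by
        rw [List.drop_zero, List.eraseIdx_eq_take_drop_succ, hd]
      have he2 : (arr.eraseIdx (i+1)).drop 0 = arr.take i ++ (arr[i] :: arr.drop (i+2)) := by
        rw [List.drop_zero, List.eraseIdx_eq_take_drop_succ,
            take_succ_concat arr i hi, List.append_assoc]
        rfl
      rw [he1, he2, chainB_append, chainB_append, hsplit.1]
      simp only [Bool.true_and]
      cases hizero : decide (i = 0) with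
      | true =>
        simp only [decide_eq_true_eq] at hizero
        subst hizero
        simp only [List.take_zero, lastLe, List.getLast?_nil, Bool.true_and]
        rw [goB_true]
        exact chainB_absorb _ _ _ (by omega)
      | false =>
        simp only [decide_eq_false_iff_not] at hizero
        rw [if_neg hizero]
        have h1 : 1 ≤ i := by omega
        have hgl := getLast?_take arr i hi h1
        have hip : i - 1 < arr.length := by omega
        rw [List.getElem?_eq_getElem hip]
        simp only [lastLe, hgl]
        have hle : arr[i-1] ≤ arr[i] := by
          have := hsplit.2
          simp only [lastLe, hgl, decide_eq_true_eq] at this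
          exact this
        by_cases hq : arr[i-1]'hip ≤ arr[i+1]
        · simp only [hq, decide_true, Bool.true_and, if_pos, decide_eq_true hle]
          rw [goB_true]
          exact chainB_absorb _ _ _ (by omega)
        · have hd' : decide (arr[i-1]'hip ≤ arr[i+1]) = false := by
            simp [hq]
          simp only [hd', Bool.false_and, Bool.false_or, decide_eq_true hle, Bool.true_and]
          rw [if_neg (by simp : ¬ (false = true)), if_neg hq, goB_true]
    · -- no violation: both advance
      have hle : arr[i] ≤ arr[i+1] := by omega
      have hnlt : ¬ (arr[i+1] < arr[i]) := hv
      simp only [hv, if_false]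
      have hch2 : chainB (arr.take (i+2)) = true := by
        rw [take_succ_concat arr (i+1) h, chainB_append]
        simp only [Bool.and_eq_true]
        refine ⟨⟨hch, ?_⟩, rfl⟩
        have hgl : (arr.take (i+1)).getLast? = some arr[i] := by
          simpa using getLast?_take arr (i+1) h (by omega)
        simp [lastLe, hgl, hle]
      have := mainM f arr (i+1) (by omega) hch2
      rw [this]
      have : i + 1 - 1 = i := by omega
      rw [if_neg (by omega : ¬ i + 1 = 0), this, List.getElem?_eq_getElem hi,
          List.getElem?_eq_getElem h]
  · rw [checkA]; simp only [h, dite_false]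
    rw [List.drop_eq_nil_of_le (by omega)]; rfl

-- ===== VERDICT (by name: the statement is the Claim_ definition above) =====
theorem checkPossibility_spec : Claim_equal_checkPossibility := by
  intro nums _
  unfold Spec_checkPossibility checkPossibility checkPossibility_alt
  cases nums with
  | nil => rfl
  | cons x xs =>
    have := mainM (2 * (x :: xs).length + 2) (x :: xs) 0 (by omega)
      (by cases xs <;> simp [chainB])
    rw [this]
    simp [goB]
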